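-- pv_equiv track=rewrite | github.com/JawadGigyani/Advent-of-Code-2025 | Day 11 - Reactor/main.py | nodes_that_can_reach
-- ===== SOURCE A (Python) =====
-- from collections import defaultdict, deque
-- from typing import DefaultDict, Dict, Iterable, List, Set, Tuple
--
-- Graph = Dict[str, List[str]]
--
-- def nodes_that_can_reach(graph: Graph, end: str) -> Set[str]:
--     rev: DefaultDict[str, List[str]] = defaultdict(list)
--     for src, dsts in graph.items():
--         for dst in dsts:
--             rev[dst].append(src)
--
--     seen: Set[str] = set()
--     q: deque[str] = deque([end])
--     seen.add(end)
--     while q: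
--         cur = q.popleft()
--         for prev in rev.get(cur, []):
--             if prev not in seen:
--                 seen.add(prev)
--                 q.append(prev)
--     return seen
-- ===== SOURCE B (Python) =====
-- def nodes_that_can_reach(graph, end):
--     # Forward fixpoint iteration: repeatedly relax forward edges until no change
--     # (no reverse adjacency list, no queue).
--     reach = {end}
--     changed = True
--     while changed:
--         changed = False
--         for src, dsts in graph.items():
--             if src not in reach and any(d in reach for d in dsts):
--                 reach.add(src)
--                 changed = True
--     return reach
-- ===== Notes on version B (the rewrite author's own statement) =====
-- stated objective: alternative
-- what changed: Replaces the reverse-adjacency-list construction plus BFS queue by a forward fixpoint iteration that repeatedly relaxes the graph's forward edges into the reach set until a full pass makes no change.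
import Mathlib
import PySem

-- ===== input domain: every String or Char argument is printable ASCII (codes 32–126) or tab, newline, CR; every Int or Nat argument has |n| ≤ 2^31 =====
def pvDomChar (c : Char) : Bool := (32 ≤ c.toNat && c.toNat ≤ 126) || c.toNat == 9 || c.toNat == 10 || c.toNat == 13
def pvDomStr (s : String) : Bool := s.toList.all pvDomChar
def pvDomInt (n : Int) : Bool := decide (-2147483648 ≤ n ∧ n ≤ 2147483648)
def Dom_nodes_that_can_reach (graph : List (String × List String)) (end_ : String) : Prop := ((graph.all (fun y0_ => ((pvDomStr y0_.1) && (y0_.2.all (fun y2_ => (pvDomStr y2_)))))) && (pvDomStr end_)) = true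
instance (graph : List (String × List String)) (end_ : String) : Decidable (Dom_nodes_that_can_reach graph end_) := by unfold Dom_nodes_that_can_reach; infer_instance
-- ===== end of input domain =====

-- B replaces A's reverse-graph BFS by a forward-edge fixpoint iteration (alternative algorithm, similar size).
-- Both Pythons return a SET (no iteration order); each port returns its set in the canonical sorted order
-- (outputs are compared as sets — the sort is only the list representation of the unordered return value).

-- ===== PORT A =====
-- rev: DefaultDict[str, List[str]]; rev[dst].append(src)
def pvRev (graph : List (String × List String)) : PySem.Dict String (List String) :=
  graph.foldl
    (fun rev p => p.2.foldl (fun rev dst => rev.modify dst [] (fun l => l ++ [p.1])) rev)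
    PySem.Dict.empty

-- the BFS while-loop; fuel graph.length+1 bounds the number of pops (each pop consumes one enqueue,
-- and at most graph.length+1 distinct nodes are ever enqueued) — proved sufficient below
def pvBfs (rev : PySem.Dict String (List String)) : Nat → List String → PySem.Set String → PySem.Set String
  | _, [], seen => seen
  | 0, _ :: _, seen => seen
  | fuel + 1, cur :: q, seen =>
      let sq := (rev.getD cur []).foldl
        (fun (sq : PySem.Set String × List String) prev =>
          if PySem.Set.contains sq.1 prev then sq else (PySem.Set.add sq.1 prev, sq.2 ++ [prev]))
        (seen, q)
      pvBfs rev fuel sq.2 sq.1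

def nodes_that_can_reach (graph : List (String × List String)) (end_ : String) : List String :=
  let rev := pvRev graph
  let seen := pvBfs rev (graph.length + 1) [end_] (PySem.Set.add PySem.Set.empty end_)
  PySem.List.sorted seen (fun x => x) false  -- return seen (a set: canonical sorted representation)

-- ===== PORT B =====
-- one pass of the for-loop over graph.items(); the Bool is `changed`
def pvRound (graph : List (String × List String)) (reach : PySem.Set String) : PySem.Set String × Bool :=
  graph.foldl
    (fun rb p =>
      if !PySem.Set.contains rb.1 p.1 && p.2.any (fun d => PySem.Set.contains rb.1 d)
      then (PySem.Set.add rb.1 p.1, true) else rb)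
    (reach, false)

-- the while-changed loop; fuel graph.length+1 bounds the number of rounds (every round but the last
-- adds at least one of the ≤ graph.length+1 candidate nodes) — proved sufficient below
def pvLoop (graph : List (String × List String)) : Nat → PySem.Set String → PySem.Set String
  | 0, reach => reach
  | fuel + 1, reach =>
      let rb := pvRound graph reach
      if rb.2 then pvLoop graph fuel rb.1 else rb.1

def nodes_that_can_reach_alt (graph : List (String × List String)) (end_ : String) : List String :=
  let reach := pvLoop graph (graph.length + 1) (PySem.Set.add PySem.Set.empty end_)
  PySem.List.sorted reach (fun x => x) false  -- return reach (a set: canonical sorted representation)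

-- ===== PRECONDITION & SPEC =====
def Spec_nodes_that_can_reach (graph : List (String × List String)) (end_ : String) (out : List String) : Prop := out = nodes_that_can_reach_alt graph end_
instance (graph : List (String × List String)) (end_ : String) (out : List String) : Decidable (Spec_nodes_that_can_reach graph end_ out) := by unfold Spec_nodes_that_can_reach; infer_instance

-- ===== CLAIM (what is proved, stated in full; the proofs are below) =====
def Claim_equal_nodes_that_can_reach : Prop := ∀ (graph : List (String × List String)) (end_ : String), Dom_nodes_that_can_reach graph end_ → Spec_nodes_that_can_reach graph end_ (nodes_that_can_reach graph end_)

-- ===== LEMMAS AND PROOFS =====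

-- x can reach end_ along forward edges of graph (the least such predicate)
inductive pvReach (graph : List (String × List String)) (end_ : String) : String → Prop
  | base : pvReach graph end_ end_
  | step {src : String} {dsts : List String} {d : String} :
      (src, dsts) ∈ graph → d ∈ dsts → pvReach graph end_ d → pvReach graph end_ src

-- S is closed under backward extension along graph's edges
def pvClosed (graph : List (String × List String)) (S : List String) : Prop :=
  ∀ p ∈ graph, (∃ d ∈ p.2, d ∈ S) → p.1 ∈ S

theorem pvReach_mem_of_closed (graph : List (String × List String)) (end_ : String)
    (S : List String) (hend : end_ ∈ S) (hcl : pvClosed graph S) :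
    ∀ x, pvReach graph end_ x → x ∈ S := by
  intro x hx
  induction hx with
  | base => exact hend
  | step hp hd _ ih => exact hcl _ hp ⟨_, hd, ih⟩

theorem pv_nodup_bound (graph : List (String × List String)) (end_ : String)
    (S : List String) (hnd : S.Nodup)
    (hsub : ∀ x ∈ S, x = end_ ∨ x ∈ graph.map Prod.fst) :
    S.length ≤ graph.length + 1 := by
  have h : S ⊆ end_ :: graph.map Prod.fst := by
    intro x hx
    rcases hsub x hx with h | h
    · exact h ▸ List.mem_cons_self
    · exact List.mem_cons_of_mem _ h
  have := (List.Nodup.subperm hnd h).length_le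
  simpa using this


theorem pv_mem_rev_inner (src c x : String) :
    ∀ (dsts : List String) (d : PySem.Dict String (List String)),
      (x ∈ (dsts.foldl (fun d dst => d.modify dst [] (fun l => l ++ [src])) d).getD c [] ↔
        x ∈ d.getD c [] ∨ (x = src ∧ c ∈ dsts)) := by
  intro dsts
  induction dsts with
  | nil => simp
  | cons dst rest ih =>
      intro d
      simp only [List.foldl_cons]
      rw [ih]
      rw [PySem.Dict.getD_modify]
      by_cases h : c = dst
      · simp [h]
        tauto
      · simp [h]

theorem pv_mem_rev_outer (c x : String) :
    ∀ (l : List (String × List String)) (d : PySem.Dict String (List String)),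
      (x ∈ (l.foldl (fun rev p => p.2.foldl (fun rev dst => rev.modify dst [] (fun l => l ++ [p.1])) rev) d).getD c [] ↔
        x ∈ d.getD c [] ∨ ∃ p ∈ l, x = p.1 ∧ c ∈ p.2) := by
  intro l
  induction l with
  | nil => simp
  | cons p rest ih =>
      intro d
      simp only [List.foldl_cons]
      rw [ih, pv_mem_rev_inner]
      simp
      tauto

theorem pv_bfsFold_spec :
    ∀ (l seen q : List String), ∃ new : List String,
      (l.foldl (fun (sq : PySem.Set String × List String) prev =>
        if PySem.Set.contains sq.1 prev then sq else (PySem.Set.add sq.1 prev, sq.2 ++ [prev])) (seen, q))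
        = (seen ++ new, q ++ new) ∧
      (∀ x ∈ new, x ∈ l ∧ x ∉ seen) ∧
      (seen.Nodup → (seen ++ new).Nodup) ∧
      (∀ x ∈ l, x ∈ seen ++ new) := by
  intro l
  induction l with
  | nil => intro seen q; exact ⟨[], by simp⟩
  | cons prev l ih =>
      intro seen q
      simp only [List.foldl_cons]
      by_cases h : prev ∈ seen
      · have hc : PySem.Set.contains seen prev = true := (PySem.Set.contains_iff _ _).2 h
        rw [if_pos hc]
        obtain ⟨new, heq, hnew, hnd, hall⟩ := ih seen q
        refine ⟨new, heq, ?_, hnd, ?_⟩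
        · exact fun x hx => ⟨List.mem_cons_of_mem _ (hnew x hx).1, (hnew x hx).2⟩
        · intro x hx
          rcases List.mem_cons.1 hx with rfl | hx
          · exact List.mem_append_left _ h
          · exact hall x hx
      · have hc : PySem.Set.contains seen prev = false := by
          cases hcc : PySem.Set.contains seen prev
          · rfl
          · exact absurd ((PySem.Set.contains_iff _ _).1 hcc) h
        rw [hc, if_neg (by simp)]
        rw [PySem.Set.add_of_not_mem h]
        obtain ⟨new, heq, hnew, hnd, hall⟩ := ih (seen ++ [prev]) (q ++ [prev])
        refine ⟨prev :: new, ?_, ?_, ?_, ?_⟩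
        · rw [heq]; simp
        · intro x hx
          rcases List.mem_cons.1 hx with rfl | hx
          · exact ⟨List.mem_cons_self, h⟩
          · refine ⟨List.mem_cons_of_mem _ (hnew x hx).1, ?_⟩
            intro hx2
            exact (hnew x hx).2 (List.mem_append_left _ hx2)
        · intro hsn
          have : (seen ++ [prev]).Nodup := by
            simp only [List.nodup_append, hsn, true_and]
            refine ⟨by simp, ?_⟩
            intro a ha b hb hab
            subst hab
            simp only [List.mem_singleton] at hb
            subst hb
            exact h ha
          simpa using hnd this
        · intro x hx
          rcases List.mem_cons.1 hx with rfl | hx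
          · simp
          · have := hall x hx
            simpa using this

theorem pv_mem_rev (graph : List (String × List String)) (c x : String) :
    x ∈ (pvRev graph).getD c [] ↔ ∃ p ∈ graph, x = p.1 ∧ c ∈ p.2 := by
  unfold pvRev
  rw [pv_mem_rev_outer]
  simp [PySem.Dict.getD_empty]

theorem pv_bfs_spec (graph : List (String × List String)) (end_ : String) :
    ∀ (fuel : Nat) (q seen : List String),
      seen.Nodup →
      (∀ x ∈ q, x ∈ seen) →
      (∀ x ∈ seen, x = end_ ∨ x ∈ graph.map Prod.fst) →
      (∀ c ∈ seen, c ∈ q ∨ ∀ p ∈ (pvRev graph).getD c [], p ∈ seen) →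
      q.length + graph.length + 1 ≤ fuel + seen.length →
      (∀ x ∈ seen, pvReach graph end_ x) →
      (∀ x ∈ seen, x ∈ pvBfs (pvRev graph) fuel q seen) ∧
      (pvBfs (pvRev graph) fuel q seen).Nodup ∧
      (∀ x ∈ pvBfs (pvRev graph) fuel q seen, pvReach graph end_ x) ∧
      (∀ c ∈ pvBfs (pvRev graph) fuel q seen, ∀ p ∈ (pvRev graph).getD c [], p ∈ pvBfs (pvRev graph) fuel q seen) ∧
      (∀ x ∈ pvBfs (pvRev graph) fuel q seen, x = end_ ∨ x ∈ graph.map Prod.fst) := by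
  intro fuel
  induction fuel with
  | zero =>
      intro q seen hnd hq hsub hinv hcount hsnd
      cases q with
      | nil =>
          simp only [pvBfs]
          refine ⟨fun x hx => hx, hnd, hsnd, ?_, hsub⟩
          intro c hc p hp
          rcases hinv c hc with hcq | hcl
          · exact absurd hcq (List.not_mem_nil)
          · exact hcl p hp
      | cons cur q =>
          exfalso
          have hb := pv_nodup_bound graph end_ seen hnd hsub
          simp only [List.length_cons] at hcount
          omega
  | succ fuel ih =>
      intro q seen hnd hq hsub hinv hcount hsnd
      cases q with
      | nil =>
          simp only [pvBfs]
          refine ⟨fun x hx => hx, hnd, hsnd, ?_, hsub⟩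
          intro c hc p hp
          rcases hinv c hc with hcq | hcl
          · exact absurd hcq (List.not_mem_nil)
          · exact hcl p hp
      | cons cur q =>
          obtain ⟨new, heq, hnew, hndf, hall⟩ := pv_bfsFold_spec ((pvRev graph).getD cur []) seen q
          have hstep : pvBfs (pvRev graph) (fuel + 1) (cur :: q) seen
              = pvBfs (pvRev graph) fuel (q ++ new) (seen ++ new) := by
            simp only [pvBfs]
            rw [heq]
          rw [hstep]
          have hcur : cur ∈ seen := hq cur List.mem_cons_self
          have hnewrev : ∀ x ∈ new, x ∈ (pvRev graph).getD cur [] := fun x hx => (hnew x hx).1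
          have hsub' : ∀ x ∈ seen ++ new, x = end_ ∨ x ∈ graph.map Prod.fst := by
            intro x hx
            rcases List.mem_append.1 hx with hx | hx
            · exact hsub x hx
            · obtain ⟨p, hpg, rfl, _⟩ := (pv_mem_rev graph cur x).1 (hnewrev x hx)
              exact Or.inr (List.mem_map.2 ⟨p, hpg, rfl⟩)
          have hsnd' : ∀ x ∈ seen ++ new, pvReach graph end_ x := by
            intro x hx
            rcases List.mem_append.1 hx with hx | hx
            · exact hsnd x hx
            · obtain ⟨p, hpg, rfl, hcd⟩ := (pv_mem_rev graph cur x).1 (hnewrev x hx)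
              exact pvReach.step hpg hcd (hsnd cur hcur)
          have hmain := ih (q ++ new) (seen ++ new) (hndf hnd)
            (by
              intro x hx
              rcases List.mem_append.1 hx with hx | hx
              · exact List.mem_append_left _ (hq x (List.mem_cons_of_mem _ hx))
              · exact List.mem_append_right _ hx)
            hsub'
            (by
              intro c hc
              rcases List.mem_append.1 hc with hc | hc
              · rcases hinv c hc with hcq | hcl
                · rcases List.mem_cons.1 hcq with rfl | hcq
                  · exact Or.inr (fun p hp => hall p hp)
                  · exact Or.inl (List.mem_append_left _ hcq)
                · exact Or.inr (fun p hp => List.mem_append_left _ (hcl p hp))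
              · exact Or.inl (List.mem_append_right _ hc))
            (by
              simp only [List.length_append, List.length_cons] at hcount ⊢
              omega)
            hsnd'
          obtain ⟨m1, m2, m3, m4, m5⟩ := hmain
          exact ⟨fun x hx => m1 x (List.mem_append_left _ hx), m2, m3, m4, m5⟩

theorem pv_roundFold_spec (graphFull : List (String × List String)) (end_ : String) :
    ∀ (l : List (String × List String)) (reach : List String) (b : Bool),
      (∀ p ∈ l, p ∈ graphFull) →
      ∃ new : List String,
        (l.foldl (fun (rb : PySem.Set String × Bool) p =>
          if !PySem.Set.contains rb.1 p.1 && p.2.any (fun d => PySem.Set.contains rb.1 d)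
          then (PySem.Set.add rb.1 p.1, true) else rb) (reach, b)).1 = reach ++ new ∧
        (∀ x ∈ new, x ∈ l.map Prod.fst ∧ x ∉ reach) ∧
        (reach.Nodup → (reach ++ new).Nodup) ∧
        ((∀ x ∈ reach, pvReach graphFull end_ x) →
          ∀ x ∈ reach ++ new, pvReach graphFull end_ x) ∧
        (b = true → (l.foldl (fun (rb : PySem.Set String × Bool) p =>
          if !PySem.Set.contains rb.1 p.1 && p.2.any (fun d => PySem.Set.contains rb.1 d)
          then (PySem.Set.add rb.1 p.1, true) else rb) (reach, b)).2 = true) ∧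
        ((l.foldl (fun (rb : PySem.Set String × Bool) p =>
          if !PySem.Set.contains rb.1 p.1 && p.2.any (fun d => PySem.Set.contains rb.1 d)
          then (PySem.Set.add rb.1 p.1, true) else rb) (reach, b)).2 = false →
          new = [] ∧ ∀ p ∈ l, (∃ d ∈ p.2, d ∈ reach) → p.1 ∈ reach) ∧
        ((l.foldl (fun (rb : PySem.Set String × Bool) p =>
          if !PySem.Set.contains rb.1 p.1 && p.2.any (fun d => PySem.Set.contains rb.1 d)
          then (PySem.Set.add rb.1 p.1, true) else rb) (reach, b)).2 = true →
          b = true ∨ new ≠ []) := by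
  intro l
  induction l with
  | nil =>
      intro reach b _
      refine ⟨[], by simp, by simp, by simp, ?_, by simp, by simp, by simp⟩
      intro h x hx
      exact h x (by simpa using hx)
  | cons p l ih =>
      intro reach b hsub
      have hsub' : ∀ q ∈ l, q ∈ graphFull := fun q hq => hsub q (List.mem_cons_of_mem _ hq)
      simp only [List.foldl_cons]
      by_cases hcond : (!PySem.Set.contains reach p.1 && p.2.any (fun d => PySem.Set.contains reach d)) = true
      · rw [if_pos hcond]
        have hnotmem : p.1 ∉ reach := by
          intro hmem
          have hcond' := hcond
          simp only [Bool.and_eq_true, Bool.not_eq_true'] at hcond'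
          have h2' := (PySem.Set.contains_iff _ _).2 hmem
          rw [hcond'.1] at h2'
          exact Bool.false_ne_true h2' 
        have hadd : PySem.Set.add reach p.1 = reach ++ [p.1] := PySem.Set.add_of_not_mem hnotmem
        rw [hadd]
        obtain ⟨new, h1, h2, h3, h4, h5, h6, h7⟩ := ih (reach ++ [p.1]) true hsub'
        refine ⟨p.1 :: new, ?_, ?_, ?_, ?_, ?_, ?_, ?_⟩
        · rw [h1]; simp
        · intro x hx
          rcases List.mem_cons.1 hx with rfl | hx
          · exact ⟨by simp, hnotmem⟩
          · refine ⟨by simp only [List.map_cons]; exact List.mem_cons_of_mem _ (by simpa using (h2 x hx).1), ?_⟩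
            intro hx2
            exact (h2 x hx).2 (List.mem_append_left _ hx2)
        · intro hnd
          have hnd' : (reach ++ [p.1]).Nodup := by
            simp only [List.nodup_append, hnd, true_and]
            refine ⟨by simp, ?_⟩
            intro a ha c hc hac
            subst hac
            simp only [List.mem_singleton] at hc
            subst hc
            exact hnotmem ha
          have := h3 hnd'
          simpa using this
        · intro hr x hx
          have hd : ∃ d ∈ p.2, d ∈ reach := by
            have hcond' := hcond
            simp only [Bool.and_eq_true] at hcond'
            obtain ⟨d, hd1, hd2⟩ := List.any_eq_true.1 hcond'.2
            exact ⟨d, hd1, (PySem.Set.contains_iff _ _).1 hd2⟩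
          have hr' : ∀ y ∈ reach ++ [p.1], pvReach graphFull end_ y := by
            intro y hy
            rcases List.mem_append.1 hy with hy | hy
            · exact hr y hy
            · simp only [List.mem_singleton] at hy
              subst hy
              obtain ⟨d, hd1, hd2⟩ := hd
              exact pvReach.step (hsub p List.mem_cons_self) hd1 (hr d hd2)
          have := h4 hr'
          rcases List.mem_append.1 hx with hy | hy
          · exact this x (List.mem_append_left _ (List.mem_append_left _ hy))
          · rcases List.mem_cons.1 hy with rfl | hy
            · exact this _ (List.mem_append_left _ (List.mem_append_right _ (by simp)))
            · exact this x (List.mem_append_right _ hy)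
        · intro _; exact h5 rfl
        · intro hflag
          exact absurd (h5 rfl) (by rw [hflag]; simp)
        · intro _; exact Or.inr (by simp)
      · rw [if_neg hcond]
        obtain ⟨new, h1, h2, h3, h4, h5, h6, h7⟩ := ih reach b hsub'
        refine ⟨new, h1, ?_, h3, h4, h5, ?_, h7⟩
        · intro x hx
          exact ⟨by simp only [List.map_cons]; exact List.mem_cons_of_mem _ ((h2 x hx).1), (h2 x hx).2⟩
        · intro hflag
          obtain ⟨hn, hcl⟩ := h6 hflag
          refine ⟨hn, ?_⟩
          intro q hq hdq
          rcases List.mem_cons.1 hq with rfl | hq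
          · -- condition was false for p = q
            by_contra hq1
            apply hcond
            simp only [Bool.and_eq_true, Bool.not_eq_true']
            constructor
            · cases hcc : PySem.Set.contains reach q.1
              · rfl
              · exact absurd ((PySem.Set.contains_iff _ _).1 hcc) hq1
            · obtain ⟨d, hd1, hd2⟩ := hdq
              exact List.any_eq_true.2 ⟨d, hd1, (PySem.Set.contains_iff _ _).2 hd2⟩
          · exact hcl q hq hdq

theorem pv_loop_spec (graph : List (String × List String)) (end_ : String) :
    ∀ (fuel : Nat) (reach : List String),
      reach.Nodup →
      (∀ x ∈ reach, x = end_ ∨ x ∈ graph.map Prod.fst) →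
      (∀ x ∈ reach, pvReach graph end_ x) →
      graph.length + 2 ≤ fuel + reach.length →
      (∀ x ∈ reach, x ∈ pvLoop graph fuel reach) ∧
      (pvLoop graph fuel reach).Nodup ∧
      (∀ x ∈ pvLoop graph fuel reach, pvReach graph end_ x) ∧
      pvClosed graph (pvLoop graph fuel reach) := by
  intro fuel
  induction fuel with
  | zero =>
      intro reach hnd hsub hsnd hcount
      exfalso
      have hb := pv_nodup_bound graph end_ reach hnd hsub
      omega
  | succ fuel ih =>
      intro reach hnd hsub hsnd hcount
      obtain ⟨new, h1, h2, h3, h4, _h5, h6, h7⟩ :=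
        pv_roundFold_spec graph end_ graph reach false (fun p hp => hp)
      have hr1 : (pvRound graph reach).1 = reach ++ new := h1
      simp only [pvLoop]
      cases hflag : (pvRound graph reach).2
      · obtain ⟨hn, hcl⟩ := h6 hflag
        have hres : (pvRound graph reach).1 = reach := by rw [hr1, hn, List.append_nil]
        rw [if_neg (by simp), hres]
        exact ⟨fun x hx => hx, hnd, hsnd, hcl⟩
      · rw [if_pos rfl, hr1]
        have hne : new ≠ [] := by
          rcases h7 hflag with h | h
          · exact absurd h (by simp)
          · exact h
        have hmain := ih (reach ++ new) (h3 hnd)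
            (by
              intro x hx
              rcases List.mem_append.1 hx with hx | hx
              · exact hsub x hx
              · exact Or.inr ((h2 x hx).1))
            (h4 hsnd)
            (by
              have : 0 < new.length := List.length_pos_iff.2 hne
              simp only [List.length_append]
              omega)
        obtain ⟨m1, m2, m3, m4⟩ := hmain
        exact ⟨fun x hx => m1 x (List.mem_append_left _ hx), m2, m3, m4⟩

-- ===== VERDICT (by name: the statement is the Claim_ definition above) =====
theorem nodes_that_can_reach_spec : Claim_equal_nodes_that_can_reach := by
  intro graph end_ _dom
  unfold Spec_nodes_that_can_reach nodes_that_can_reach nodes_that_can_reach_alt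
  show PySem.List.sorted
      (pvBfs (pvRev graph) (graph.length + 1) [end_] (PySem.Set.add PySem.Set.empty end_))
      (fun x => x) false
    = PySem.List.sorted
      (pvLoop graph (graph.length + 1) (PySem.Set.add PySem.Set.empty end_))
      (fun x => x) false
  have hseed : PySem.Set.add PySem.Set.empty end_ = [end_] := rfl
  rw [hseed]
  have hA := pv_bfs_spec graph end_ (graph.length + 1) [end_] [end_]
    (by simp)
    (fun x hx => hx)
    (by intro x hx; simp only [List.mem_singleton] at hx; exact Or.inl hx)
    (by intro c hc; exact Or.inl hc)
    (by omega)
    (by intro x hx; simp only [List.mem_singleton] at hx; subst hx; exact pvReach.base)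
  obtain ⟨hA1, hAnd, hAsnd, hAcl, _⟩ := hA
  have hAend : end_ ∈ pvBfs (pvRev graph) (graph.length + 1) [end_] [end_] :=
    hA1 end_ (by simp)
  have hAclosed : pvClosed graph (pvBfs (pvRev graph) (graph.length + 1) [end_] [end_]) := by
    intro p hp hd
    obtain ⟨d, hd1, hd2⟩ := hd
    exact hAcl d hd2 p.1 ((pv_mem_rev graph d p.1).2 ⟨p, hp, rfl, hd1⟩)
  have hB := pv_loop_spec graph end_ (graph.length + 1) [end_]
    (by simp)
    (by intro x hx; simp only [List.mem_singleton] at hx; exact Or.inl hx)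
    (by intro x hx; simp only [List.mem_singleton] at hx; subst hx; exact pvReach.base)
    (by simp)
  obtain ⟨hB1, hBnd, hBsnd, hBcl⟩ := hB
  have hBend : end_ ∈ pvLoop graph (graph.length + 1) [end_] := hB1 end_ (by simp)
  have hmem : ∀ x, x ∈ pvBfs (pvRev graph) (graph.length + 1) [end_] [end_]
      ↔ x ∈ pvLoop graph (graph.length + 1) [end_] := by
    intro x
    constructor
    · intro hx
      exact pvReach_mem_of_closed graph end_ _ hBend hBcl x (hAsnd x hx)
    · intro hx
      exact pvReach_mem_of_closed graph end_ _ hAend hAclosed x (hBsnd x hx)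
  have hperm := (List.perm_ext_iff_of_nodup hAnd hBnd).2 hmem
  exact (PySem.List.sorted_id_eq_sorted_id_iff_perm _ _).2 hperm
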